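-- pv_equiv track=rewrite | github.com/career-prep/ucp-namer-latam-2026 | homework3/rafael_belmonte/q5_FirstKBinaryNumbers.py | first_k_binary_numbers
-- ===== SOURCE A (Python) =====
-- from collections import deque
--
-- def first_k_binary_numbers(k):
--     if k <= 0:
--         return []
--     result = ["0"]
--     if k == 1:
--         return result
--     queue = deque(["1"])
--     while len(result) < k:
--         s = queue.popleft()
--         result.append(s)
--         if len(result) == k:
--             break
--         queue.append(s + "0")
--         queue.append(s + "1")
--     return result
-- ===== SOURCE B (Python) =====
-- def first_k_binary_numbers(k):
--     return [format(i, 'b') for i in range(k)]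
-- ===== Notes on version B (the rewrite author's own statement) =====
-- stated objective: simpler
-- what changed: Replaces the BFS deque that grows binary strings level by level with a direct one-liner mapping each index i in range(k) to its binary representation format(i,'b').
import Mathlib
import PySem

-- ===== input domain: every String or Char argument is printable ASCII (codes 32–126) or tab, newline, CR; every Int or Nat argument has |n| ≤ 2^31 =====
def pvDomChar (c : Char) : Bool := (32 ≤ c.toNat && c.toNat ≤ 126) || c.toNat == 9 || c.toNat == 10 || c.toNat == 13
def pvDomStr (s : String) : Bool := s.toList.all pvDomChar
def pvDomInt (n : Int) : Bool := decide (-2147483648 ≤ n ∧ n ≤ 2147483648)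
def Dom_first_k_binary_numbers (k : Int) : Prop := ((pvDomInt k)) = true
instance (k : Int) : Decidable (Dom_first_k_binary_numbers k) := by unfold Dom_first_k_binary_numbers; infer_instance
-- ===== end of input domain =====

-- B replaces A's BFS deque (level-order growth of binary strings) by a direct map of each
-- index i in range(k) to its binary representation; objective: simpler.

-- ===== PORT A =====
-- the while-loop of A; fuel bounds the iterations (each appends one element to result,
-- so k iterations always suffice); popleft on an empty queue (never reached) ends the loop
def pvALoop (fuel : Nat) (queue result : List String) (k : Nat) : List String :=
  match fuel with
  | 0 => result
  | fuel' + 1 =>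
    if result.length < k then
      match queue with
      | [] => result
      | s :: qs =>
        let result' := result ++ [s]
        if result'.length = k then result'
        else pvALoop fuel' (qs ++ [s ++ "0", s ++ "1"]) result' k
    else result

def first_k_binary_numbers (k : Int) : List String :=
  if k ≤ 0 then []
  else
    let result := ["0"]
    if k = 1 then result
    else pvALoop k.toNat ["1"] result k.toNat

-- ===== PORT B =====
-- format(i, 'b') for a nonnegative i: binary digits, most significant first; '0' for 0
def pvBinDigits (n : Nat) : List Char :=
  if n = 0 then [] else pvBinDigits (n / 2) ++ [if n % 2 = 1 then '1' else '0']
decreasing_by exact Nat.div_lt_self (Nat.pos_of_ne_zero (by assumption)) one_lt_two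

def pvFormatB (i : Int) : String :=
  if i = 0 then "0" else String.ofList (pvBinDigits i.toNat)

def first_k_binary_numbers_alt (k : Int) : List String :=
  (PySem.List.pyRange 0 k 1).map pvFormatB

-- ===== PRECONDITION & SPEC =====
def Spec_first_k_binary_numbers (k : Int) (out : List String) : Prop := out = first_k_binary_numbers_alt k
instance (k : Int) (out : List String) : Decidable (Spec_first_k_binary_numbers k out) := by unfold Spec_first_k_binary_numbers; infer_instance

-- ===== CLAIM (what is proved, stated in full; the proofs are below) =====
def Claim_equal_first_k_binary_numbers : Prop := ∀ (k : Int), Dom_first_k_binary_numbers k → Spec_first_k_binary_numbers k (first_k_binary_numbers k)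

-- ===== LEMMAS AND PROOFS =====

-- the binary string of a natural number, as B computes it
def pvBinStr (n : Nat) : String :=
  if n = 0 then "0" else String.ofList (pvBinDigits n)

lemma pvBinDigits_two_mul (m : Nat) (hm : 1 ≤ m) :
    pvBinDigits (2 * m) = pvBinDigits m ++ ['0'] := by
  rw [pvBinDigits]
  have h0 : 2 * m ≠ 0 := by omega
  simp [h0, Nat.mul_div_cancel_left m (by norm_num : 0 < 2), Nat.mul_mod_right]

lemma pvBinDigits_two_mul_add_one (m : Nat) :
    pvBinDigits (2 * m + 1) = pvBinDigits m ++ ['1'] := by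
  rw [pvBinDigits]
  have h0 : 2 * m + 1 ≠ 0 := by omega
  have hd : (2 * m + 1) / 2 = m := by omega
  have hmm : (2 * m + 1) % 2 = 1 := by omega
  simp [hd, hmm]

lemma pvBinStr_append_zero (m : Nat) (hm : 1 ≤ m) :
    pvBinStr m ++ "0" = pvBinStr (2 * m) := by
  have h1 : m ≠ 0 := by omega
  have h2 : 2 * m ≠ 0 := by omega
  simp only [pvBinStr, h1, h2, if_false, pvBinDigits_two_mul m hm]
  apply String.ext
  simp

lemma pvBinStr_append_one (m : Nat) (hm : 1 ≤ m) :
    pvBinStr m ++ "1" = pvBinStr (2 * m + 1) := by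
  have h1 : m ≠ 0 := by omega
  have h2 : 2 * m + 1 ≠ 0 := by omega
  simp only [pvBinStr, h1, h2, if_false, pvBinDigits_two_mul_add_one m]
  apply String.ext
  simp

-- loop invariant: result holds the strings of 0..m-1 and the queue those of m..2m-1
lemma pvALoop_spec (fuel : Nat) : ∀ (m k : Nat), 1 ≤ m → m ≤ k → k ≤ m + fuel →
    pvALoop fuel ((List.range' m m).map pvBinStr) ((List.range m).map pvBinStr) k
      = (List.range k).map pvBinStr := by
  induction fuel with
  | zero =>
    intro m k h1 h2 h3
    have : m = k := by omega
    subst this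
    rfl
  | succ fuel ih =>
    intro m k h1 h2 h3
    rw [pvALoop.eq_def]
    by_cases hlt : m < k
    · have hq : List.range' m m = m :: List.range' (m + 1) (m - 1) := by
        have h : List.range' m (m - 1 + 1) = m :: List.range' (m + 1) (m - 1) := by
          simpa using (List.range'_succ (s := m) (n := m - 1) (step := 1))
        rw [show m - 1 + 1 = m from by omega] at h
        exact h
      rw [hq]
      simp only [List.map_cons, List.length_map, List.length_range, if_pos hlt]
      have hres : (List.range m).map pvBinStr ++ [pvBinStr m]
          = (List.range (m + 1)).map pvBinStr := by
        rw [List.range_succ, List.map_append]; rfl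
      by_cases hk : m + 1 = k
      · have hlen : ((List.range m).map pvBinStr ++ [pvBinStr m]).length = k := by
          simp only [List.length_append, List.length_map, List.length_range,
            List.length_cons, List.length_nil]
          omega
        rw [if_pos hlen, hres, hk]
      · have hlen : ¬ ((List.range m).map pvBinStr ++ [pvBinStr m]).length = k := by
          simp only [List.length_append, List.length_map, List.length_range,
            List.length_cons, List.length_nil]
          omega
        rw [if_neg hlen, hres]
        have hqueue : (List.range' (m + 1) (m - 1)).map pvBinStr
              ++ [pvBinStr m ++ "0", pvBinStr m ++ "1"]
            = (List.range' (m + 1) (m + 1)).map pvBinStr := by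
          rw [pvBinStr_append_zero m h1, pvBinStr_append_one m h1]
          have hsplit : List.range' (m + 1) (m + 1)
              = List.range' (m + 1) (m - 1) ++ List.range' (2 * m) 2 := by
            have h := List.range'_append (s := m + 1) (m := m - 1) (n := 2) (step := 1)
            simp only [one_mul] at h
            have e1 : m + 1 + (m - 1) = 2 * m := by omega
            have e2 : m - 1 + 2 = m + 1 := by omega
            rw [e1, e2] at h
            exact h.symm
          rw [hsplit, List.map_append]
          have : List.range' (2 * m) 2 = [2 * m, 2 * m + 1] := by
            simp [List.range'_succ]
          rw [this]
          rfl
        rw [hqueue]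
        exact ih (m + 1) k (by omega) (by omega) (by omega)
    · have : m = k := by omega
      subst this
      simp

lemma pvFormatB_natCast (n : Nat) : pvFormatB (n : Int) = pvBinStr n := by
  unfold pvFormatB pvBinStr
  by_cases h : n = 0
  · subst h; rfl
  · simp [h, Int.natCast_eq_zero]

-- ===== VERDICT (by name: the statement is the Claim_ definition above) =====
theorem first_k_binary_numbers_spec : Claim_equal_first_k_binary_numbers := by
  intro k _
  unfold Spec_first_k_binary_numbers first_k_binary_numbers first_k_binary_numbers_alt
  by_cases h0 : k ≤ 0
  · rw [if_pos h0, PySem.List.pyRange_one_eq_nil h0]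
    rfl
  · rw [if_neg h0, PySem.List.pyRange_one]
    simp only [sub_zero, zero_add]
    have hmap : (List.range k.toNat).map (fun j : Nat => pvFormatB (j : Int))
        = (List.range k.toNat).map pvBinStr := by
      exact List.map_congr_left (fun n _ => pvFormatB_natCast n)
    by_cases h1 : k = 1
    · subst h1; rfl
    · simp only [h1, if_false, List.map_map]
      have hcomp : (pvFormatB ∘ fun k : Nat => (k : Int)) = fun j : Nat => pvFormatB (j : Int) := rfl
      rw [hcomp, hmap]
      have hk2 : 2 ≤ k.toNat := by omega
      have hd0 : pvBinDigits 0 = [] := by simp [pvBinDigits]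
      have hone : pvBinStr 1 = "1" := by
        have hd : pvBinDigits 1 = ['1'] := by
          rw [pvBinDigits]
          simp [hd0]
        rw [pvBinStr]
        simp only [one_ne_zero, if_false, hd]
      have h01 : (["0"] : List String) = (List.range 1).map pvBinStr := by
        simp [pvBinStr]
      have hq1 : (["1"] : List String) = (List.range' 1 1).map pvBinStr := by
        simp [hone]
      rw [h01, hq1]
      exact pvALoop_spec k.toNat 1 k.toNat (by omega) (by omega) (by omega)
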